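-- pv_equiv track=rewrite | github.com/allainclair/coding | 2021/nops/main.py | is_comprised_other_words
-- ===== SOURCE A (Python) =====
-- from collections import defaultdict
--
-- def get_removing_intervals(word, words):
--     removing_words = defaultdict(list)
--     for w in words:
--         index = word.find(w)
--         while index > -1:
--             start_index = index
--             end_index = index + len(w)
--             removing_words[w].append((start_index, end_index))
--             index = word.find(w, end_index)
--     return removing_words
--
-- def is_comprised_other_words(word, words):
--     removing_intervals = get_removing_intervals(word, words)
--     # Let's mark the word's interval.
--     # To be a 'comprised_other_words' we need all(marks).
--     # It means we have words from 'words' to match all chars in the 'word' arg.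
--     marks = [False]*len(word)
--     for w, intervals in removing_intervals.items():
--         for interval in intervals:
--             start, end = interval
--             marks[start:end] = [True]*(end - start)
--
--     removing_words = sorted(removing_intervals, reverse=True)
--     return all(marks)
-- ===== SOURCE B (Python) =====
-- def is_comprised_other_words(word, words):
--     # Collect greedy non-overlapping occurrences of each word as intervals,
--     # then sort by start and sweep, merging coverage, instead of painting a marks array.
--     n = len(word)
--     intervals = []
--     for w in words:
--         i = word.find(w)
--         while i >= 0:
--             end = i + len(w)
--             intervals.append((i, end))
--             i = word.find(w, end)
--     intervals.sort(key=lambda p: p[0])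
--     covered = 0
--     for s, e in intervals:
--         if s > covered:
--             return False
--         if e > covered:
--             covered = e
--     return covered >= n
-- ===== Notes on version B (the rewrite author's own statement) =====
-- stated objective: alternative
-- what changed: B replaces A's defaultdict of per-word interval lists plus per-interval boolean marks-array slice painting and all(marks) by a flat occurrence-interval list sorted by start and a single merge sweep over it with early exit.
import Mathlib
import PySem

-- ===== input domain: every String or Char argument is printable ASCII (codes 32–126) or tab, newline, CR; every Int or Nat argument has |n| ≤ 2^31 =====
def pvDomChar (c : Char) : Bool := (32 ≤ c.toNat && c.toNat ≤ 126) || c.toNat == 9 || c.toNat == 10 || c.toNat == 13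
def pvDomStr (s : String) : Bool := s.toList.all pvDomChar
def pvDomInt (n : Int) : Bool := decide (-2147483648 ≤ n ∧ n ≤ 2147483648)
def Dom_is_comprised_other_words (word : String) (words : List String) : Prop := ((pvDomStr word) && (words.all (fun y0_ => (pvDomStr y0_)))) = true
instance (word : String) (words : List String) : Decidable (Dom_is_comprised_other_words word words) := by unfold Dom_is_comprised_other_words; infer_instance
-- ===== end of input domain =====

-- B replaces A's dict-of-intervals plus boolean marks-array painting by a flat interval
-- list sorted by start and a single merge sweep with early exit (alternative algorithm).

-- ===== PORT A =====

-- Python slice assignment marks[s:e] = [True]*(e-s); exact for 0 ≤ s ≤ e ≤ marks.length,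
-- which holds for every interval str.find produces (proved in pvOccList_bounds below).
def pvPaint (m : List Bool) (s e : Int) : List Bool :=
  m.take s.toNat ++ List.replicate (e - s).toNat true ++ m.drop e.toNat

-- the 'while index > -1' loop of get_removing_intervals, threading the defaultdict;
-- fuel = len(word)+1 bounds the iteration count (each found index advances by ≥ 1 for w ≠ "")
def pvOccDictLoop (cs w : List Char) (fuel : Nat) (idx : Int)
    (d : PySem.Dict (List Char) (List (Int × Int))) : PySem.Dict (List Char) (List (Int × Int)) :=
  match fuel with
  | 0 => d
  | f + 1 =>
    if idx > -1 then
      pvOccDictLoop cs w f (PySem.Chars.findFrom cs w (idx + (w.length : Int)) none)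
        (d.modify w [] (· ++ [(idx, idx + (w.length : Int))]))
    else d

def pvGetRemovingIntervals (cs : List Char) (words : List String) :
    PySem.Dict (List Char) (List (Int × Int)) :=
  words.foldl
    (fun d wstr => pvOccDictLoop cs wstr.toList (cs.length + 1) (PySem.Chars.find cs wstr.toList) d)
    PySem.Dict.empty

def is_comprised_other_words (word : String) (words : List String) : Bool :=
  let cs := word.toList
  let removing := pvGetRemovingIntervals cs words
  let marks :=
    removing.items.foldl
      (fun m kv => kv.2.foldl (fun m p => pvPaint m p.1 p.2) m)
      (List.replicate cs.length false)
  let _removing_words := PySem.List.sorted removing.keys (fun k => k) true  -- dead code in A, kept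
  marks.all (fun b => b)

-- ===== PORT B =====

-- the 'while i >= 0' occurrence loop of B, returning the intervals it appends
def pvOccList (cs w : List Char) (fuel : Nat) (idx : Int) : List (Int × Int) :=
  match fuel with
  | 0 => []
  | f + 1 =>
    if 0 ≤ idx then
      (idx, idx + (w.length : Int)) ::
        pvOccList cs w f (PySem.Chars.findFrom cs w (idx + (w.length : Int)) none)
    else []

def pvSweep (n : Int) (l : List (Int × Int)) (covered : Int) : Bool :=
  match l with
  | [] => decide (covered ≥ n)
  | (s, e) :: t => if s > covered then false else pvSweep n t (if e > covered then e else covered)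

def is_comprised_other_words_alt (word : String) (words : List String) : Bool :=
  let cs := word.toList
  let intervals :=
    words.foldl
      (fun acc wstr => acc ++ pvOccList cs wstr.toList (cs.length + 1) (PySem.Chars.find cs wstr.toList))
      []
  pvSweep (cs.length : Int) (PySem.List.sorted intervals (fun p => p.1)) 0

-- ===== PRECONDITION & SPEC =====
-- Pre_ excludes an empty string among words: there Python's str.find finds "" at the same
-- position forever and A's while loop (and B's) never terminates.
def Pre_is_comprised_other_words (word : String) (words : List String) : Prop := "" ∉ words
instance (word : String) (words : List String) : Decidable (Pre_is_comprised_other_words word words) := by unfold Pre_is_comprised_other_words; infer_instance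
def pvWitness_is_comprised_other_words : String × List String := ("aab", ["aa", "b"])

def Spec_is_comprised_other_words (word : String) (words : List String) (out : Bool) : Prop := out = is_comprised_other_words_alt word words
instance (word : String) (words : List String) (out : Bool) : Decidable (Spec_is_comprised_other_words word words out) := by unfold Spec_is_comprised_other_words; infer_instance

-- ===== CLAIM (what is proved, stated in full; the proofs are below) =====
def Claim_equal_is_comprised_other_words : Prop := ∀ (word : String) (words : List String), Dom_is_comprised_other_words word words → Pre_is_comprised_other_words word words → Spec_is_comprised_other_words word words (is_comprised_other_words word words)

-- ===== LEMMAS AND PROOFS =====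

-- "position i is covered by some interval of L"
def pvCov (L : List (Int × Int)) (i : Int) : Bool := L.any (fun p => decide (p.1 ≤ i ∧ i < p.2))

theorem pvCov_congr {L L' : List (Int × Int)} (h : ∀ x, x ∈ L ↔ x ∈ L') (i : Int) :
    pvCov L i = pvCov L' i := by
  unfold pvCov
  apply Bool.eq_iff_iff.mpr
  simp only [List.any_eq_true]
  constructor
  · rintro ⟨p, hp, h2⟩; exact ⟨p, (h p).mp hp, h2⟩
  · rintro ⟨p, hp, h2⟩; exact ⟨p, (h p).mpr hp, h2⟩

-- every interval produced by the find loop is in range and nonempty (w ≠ [])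
theorem pvOccList_bounds (cs w : List Char) (hw : w ≠ []) :
    ∀ (fuel k : Nat), k ≤ cs.length →
      ∀ p ∈ pvOccList cs w fuel (PySem.Chars.findFrom cs w (k : Int) none),
        0 ≤ p.1 ∧ p.1 < p.2 ∧ p.2 ≤ (cs.length : Int) := by
  intro fuel
  induction fuel with
  | zero => intro k hk p hp; simp [pvOccList] at hp
  | succ f ih =>
    intro k hk p hp
    set j := PySem.Chars.findFrom cs w (k : Int) none with hj
    by_cases h0 : 0 ≤ j
    · have hne : j ≠ -1 := by omega
      obtain ⟨hkj, hpre, -⟩ := PySem.Chars.findFrom_natCast_spec cs w k hk hne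
      have hwpos : 0 < w.length := List.length_pos_iff.mpr hw
      have hlen : j.toNat + w.length ≤ cs.length := by
        have h1 := hpre.length_le
        rw [List.length_drop] at h1
        omega
      simp only [pvOccList, if_pos h0, List.mem_cons] at hp
      rcases hp with rfl | hp
      · refine ⟨h0, by simp; omega, by simp; omega⟩
      · have hcast : j + (w.length : Int) = ((j.toNat + w.length : Nat) : Int) := by
          push_cast; omega
        rw [hcast] at hp
        exact ih (j.toNat + w.length) hlen p hp
    · simp [pvOccList, h0] at hp

theorem pvOccList_bounds0 (cs w : List Char) (hw : w ≠ []) (fuel : Nat) :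
    ∀ p ∈ pvOccList cs w fuel (PySem.Chars.find cs w),
      0 ≤ p.1 ∧ p.1 < p.2 ∧ p.2 ≤ (cs.length : Int) := by
  have h0 : PySem.Chars.find cs w = PySem.Chars.findFrom cs w ((0 : Nat) : Int) none := by
    simp [PySem.Chars.findFrom_zero]
  rw [h0]
  exact pvOccList_bounds cs w hw fuel 0 (Nat.zero_le _)

-- A's dict-threading while loop is B's interval loop folded into the dict
theorem pvOccDictLoop_eq (cs w : List Char) :
    ∀ (fuel : Nat) (idx : Int) (d : PySem.Dict (List Char) (List (Int × Int))),
      pvOccDictLoop cs w fuel idx d =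
        (pvOccList cs w fuel idx).foldl (fun d p => d.modify w [] (· ++ [p])) d := by
  intro fuel
  induction fuel with
  | zero => intro idx d; simp [pvOccDictLoop, pvOccList]
  | succ f ih =>
    intro idx d
    by_cases h : 0 ≤ idx
    · have h' : idx > -1 := by omega
      simp [pvOccDictLoop, pvOccList, h, h', ih]
    · have h' : ¬ idx > -1 := by omega
      simp [pvOccDictLoop, pvOccList, h, h']

-- the flat (key, interval) event list both programs are folds over
def pvEvents (cs : List Char) (words : List String) : List (List Char × (Int × Int)) :=
  words.flatMap (fun wstr =>
    (pvOccList cs wstr.toList (cs.length + 1) (PySem.Chars.find cs wstr.toList)).map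
      (fun p => (wstr.toList, p)))

theorem pvGetRemovingIntervals_eq (cs : List Char) (words : List String) :
    pvGetRemovingIntervals cs words =
      (pvEvents cs words).foldl (fun d q => d.modify q.1 [] (· ++ [q.2])) PySem.Dict.empty := by
  unfold pvGetRemovingIntervals pvEvents
  rw [List.foldl_flatMap]
  congr 1
  funext d wstr
  rw [List.foldl_map]
  rw [pvOccDictLoop_eq]

-- membership in A's dict intervals = membership in B's flat interval list
theorem pvMem_dict_iff (cs : List Char) (words : List String) (x : Int × Int) :
    x ∈ (pvGetRemovingIntervals cs words).items.flatMap (·.2) ↔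
      x ∈ (pvEvents cs words).map (·.2) := by
  rw [pvGetRemovingIntervals_eq]
  generalize pvEvents cs words = L
  set D := L.foldl (fun d q => d.modify q.1 [] (· ++ [q.2])) PySem.Dict.empty with hD
  have hkeys : D.keys = PySem.Set.update (PySem.Dict.empty (κ := List Char) (ν := List (Int × Int))).keys (L.map (·.1)) := by
    rw [hD]
    exact PySem.Dict.keys_foldl_modify_key L (·.1) [] (fun _ q => (· ++ [q.2])) PySem.Dict.empty
  have hnd : D.keys.Nodup := by
    rw [hD]
    exact PySem.Dict.nodup_keys_foldl_modify_key L (·.1) [] (fun _ q => (· ++ [q.2]))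
      PySem.Dict.empty (by simp [PySem.Dict.keys_empty])
  have hgetD : ∀ k, D.getD k [] = (L.filter (fun p => p.1 == k)).map (·.2) := by
    intro k
    rw [hD, PySem.Dict.getD_foldl_modify_append L PySem.Dict.empty k]
    simp [PySem.Dict.getD_empty]
  have hitems := PySem.Dict.items_eq_map_keys D hnd []
  rw [hitems]
  simp only [List.flatMap_map, List.mem_flatMap, hgetD, List.mem_map, List.mem_filter]
  constructor
  · rintro ⟨k, hk, p, ⟨hpL, hpk⟩, rfl⟩
    exact ⟨p, hpL, rfl⟩
  · rintro ⟨p, hpL, rfl⟩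
    refine ⟨p.1, ?_, p, ⟨hpL, by simp⟩, rfl⟩
    rw [hkeys]
    have : p.1 ∈ L.map (·.1) := List.mem_map_of_mem hpL
    rw [PySem.Set.mem_update]
    right; exact this

theorem pvEvents_map_snd (cs : List Char) (words : List String) :
    (pvEvents cs words).map (·.2) =
      words.flatMap (fun wstr =>
        pvOccList cs wstr.toList (cs.length + 1) (PySem.Chars.find cs wstr.toList)) := by
  unfold pvEvents
  simp [List.map_flatMap, List.map_map]

-- painting one in-range interval: length preserved, pointwise effect
theorem pvPaint_length (m : List Bool) (s e : Int)
    (hb : 0 ≤ s ∧ s ≤ e ∧ e ≤ (m.length : Int)) : (pvPaint m s e).length = m.length := by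
  simp [pvPaint]
  omega

theorem pvPaint_getElem (m : List Bool) (s e : Int)
    (hb : 0 ≤ s ∧ s ≤ e ∧ e ≤ (m.length : Int)) (i : Nat) (hi : i < m.length) :
    (pvPaint m s e)[i]? = some (if s ≤ (i : Int) ∧ (i : Int) < e then true else m[i]) := by
  obtain ⟨h0, hse, hen⟩ := hb
  have hs : s.toNat ≤ m.length := by omega
  have he : e.toNat ≤ m.length := by omega
  have hlt : (s.toNat : Int) = s := Int.toNat_of_nonneg h0
  have het : (e.toNat : Int) = e := Int.toNat_of_nonneg (by omega)
  have hest : ((e - s).toNat : Int) = e - s := Int.toNat_of_nonneg (by omega)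
  have hlen12 : (m.take s.toNat ++ List.replicate (e - s).toNat true).length = e.toNat := by
    simp; omega
  unfold pvPaint
  rcases lt_or_ge i e.toNat with h2 | h2
  · rw [List.getElem?_append_left (by rw [hlen12]; exact h2)]
    rcases lt_or_ge i s.toNat with h1 | h1
    · rw [List.getElem?_append_left (by simp; omega)]
      rw [List.getElem?_take_of_lt h1, List.getElem?_eq_getElem hi]
      have : ¬ (s ≤ (i : Int) ∧ (i : Int) < e) := by omega
      simp [this]
    · rw [List.getElem?_append_right (by simp; omega)]
      rw [if_pos (by omega)]
      rw [List.getElem?_replicate]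
      simp
      omega
  · rw [List.getElem?_append_right (by rw [hlen12]; exact h2)]
    rw [hlen12, List.getElem?_drop]
    have : e.toNat + (i - e.toNat) = i := by omega
    rw [this, List.getElem?_eq_getElem hi]
    rw [if_neg (by omega)]

-- the full painting fold, pointwise
theorem pvFoldPaint_spec (L : List (Int × Int)) :
    ∀ (m : List Bool),
      (∀ p ∈ L, 0 ≤ p.1 ∧ p.1 ≤ p.2 ∧ p.2 ≤ (m.length : Int)) →
      (L.foldl (fun m p => pvPaint m p.1 p.2) m).length = m.length ∧
      ∀ (i : Nat), i < m.length →
        (L.foldl (fun m p => pvPaint m p.1 p.2) m)[i]? =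
          some (m[i]! || pvCov L (i : Int)) := by
  induction L with
  | nil =>
    intro m _
    refine ⟨rfl, fun i hi => ?_⟩
    simp only [List.foldl_nil]
    rw [List.getElem?_eq_getElem hi, getElem!_pos m i hi]
    simp [pvCov]
  | cons p t ih =>
    intro m hb
    have hbp := hb p (by simp)
    have hlen : (pvPaint m p.1 p.2).length = m.length :=
      pvPaint_length m p.1 p.2 ⟨hbp.1, hbp.2.1, hbp.2.2⟩
    have hbt : ∀ q ∈ t, 0 ≤ q.1 ∧ q.1 ≤ q.2 ∧ q.2 ≤ ((pvPaint m p.1 p.2).length : Int) := by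
      intro q hq
      rw [hlen]
      exact hb q (by simp [hq])
    obtain ⟨ihl, ihg⟩ := ih (pvPaint m p.1 p.2) hbt
    simp only [List.foldl_cons]
    refine ⟨by rw [ihl, hlen], fun i hi => ?_⟩
    rw [ihg i (by omega)]
    have hpg := pvPaint_getElem m p.1 p.2 ⟨hbp.1, hbp.2.1, hbp.2.2⟩ i hi
    have hpb : (pvPaint m p.1 p.2)[i]! = if p.1 ≤ (i : Int) ∧ (i : Int) < p.2 then true else m[i] := by
      rw [getElem!_pos _ i (by omega)]
      rw [List.getElem?_eq_getElem (by omega : i < (pvPaint m p.1 p.2).length)] at hpg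
      exact Option.some.inj hpg
    rw [hpb]
    have hmi : m[i]! = m[i] := getElem!_pos m i hi
    rw [hmi]
    simp only [pvCov, List.any_cons]
    rcases Decidable.em (p.1 ≤ (i : Int) ∧ (i : Int) < p.2) with hc | hc
    · simp [hc]
    · simp [hc]

-- A's result = "every position < n is covered"
theorem pvA_iff (cs : List Char) (iv : List (Int × Int))
    (hb : ∀ p ∈ iv, 0 ≤ p.1 ∧ p.1 < p.2 ∧ p.2 ≤ (cs.length : Int)) :
    ((iv.foldl (fun m p => pvPaint m p.1 p.2) (List.replicate cs.length false)).all (fun b => b) = true) ↔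
      ∀ i : Int, 0 ≤ i → i < (cs.length : Int) → pvCov iv i = true := by
  obtain ⟨hl, hg⟩ := pvFoldPaint_spec iv (List.replicate cs.length false)
    (by intro p hp; have := hb p hp; simp only [List.length_replicate]; exact ⟨this.1, by omega, this.2.2⟩)
  set marks := iv.foldl (fun m p => pvPaint m p.1 p.2) (List.replicate cs.length false) with hm
  have hml : marks.length = cs.length := by simpa using hl
  have hmi : ∀ (i : Nat) (h : i < cs.length), marks[i]'(by omega) = pvCov iv (i : Int) := by
    intro i h
    have hq := hg i (by simpa)
    rw [List.getElem?_eq_getElem (by omega)] at hq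
    have hrep : (List.replicate cs.length false)[i]! = false := by
      rw [getElem!_pos _ i (by simpa), List.getElem_replicate]
    rw [hrep] at hq
    simpa using (Option.some.inj hq)
  rw [List.all_eq_true]
  constructor
  · intro h i h0 hn
    have h1 : i.toNat < cs.length := by omega
    have h2 := h (marks[i.toNat]'(by omega)) (List.getElem_mem _)
    rw [hmi i.toNat h1] at h2
    rwa [Int.toNat_of_nonneg h0] at h2
  · intro h b hbmem
    obtain ⟨i, hilt, rfl⟩ := List.mem_iff_getElem.mp hbmem
    have h1 : i < cs.length := by omega
    rw [hmi i h1]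
    exact h (i : Int) (by omega) (by exact_mod_cast h1)

-- B's sweep = "every position in [c, n) is covered" for a start-sorted in-range list
theorem pvSweep_spec (n : Int) :
    ∀ (l : List (Int × Int)) (c : Int),
      l.Pairwise (fun a b => a.1 ≤ b.1) →
      (∀ p ∈ l, 0 ≤ p.1 ∧ p.1 < p.2 ∧ p.2 ≤ n) →
      (pvSweep n l c = true ↔ ∀ i : Int, c ≤ i → i < n → pvCov l i = true) := by
  intro l
  induction l with
  | nil =>
    intro c _ _
    simp only [pvSweep, decide_eq_true_eq]
    constructor
    · intro h i hci hin
      omega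
    · intro h
      by_contra hc
      have := h c (le_refl c) (by omega)
      simp [pvCov] at this
  | cons p t ih =>
    obtain ⟨s, e⟩ := p
    intro c hpw hb
    have hbp := hb (s, e) (by simp)
    have hpw' := (List.pairwise_cons.mp hpw).2
    have hst : ∀ q ∈ t, s ≤ q.1 := (List.pairwise_cons.mp hpw).1
    have hbt : ∀ q ∈ t, 0 ≤ q.1 ∧ q.1 < q.2 ∧ q.2 ≤ n := fun q hq => hb q (by simp [hq])
    by_cases hsc : s > c
    · simp only [pvSweep, if_pos hsc]
      constructor
      · intro h; exact absurd h (by simp)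
      · intro h
        exfalso
        have hcn : c < n := by
          have := hbp.2.2; have := hbp.2.1; omega
        have := h c (le_refl c) hcn
        simp only [pvCov, List.any_cons, Bool.or_eq_true, decide_eq_true_eq, List.any_eq_true] at this
        rcases this with h1 | ⟨q, hq, hcov⟩
        · omega
        · have := hst q hq; omega
    · simp only [pvSweep, if_neg hsc]
      rw [ih (if e > c then e else c) hpw' hbt]
      constructor
      · intro h i hci hin
        simp only [pvCov, List.any_cons, Bool.or_eq_true, decide_eq_true_eq]
        by_cases hie : i < e
        · exact Or.inl ⟨by omega, hie⟩
        · refine Or.inr ?_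
          have hx := h i (by split_ifs <;> omega) hin
          simpa only [pvCov] using hx
      · intro h i hci hin
        have hei : e ≤ i ∧ c ≤ i := by split_ifs at hci <;> omega
        have hcov := h i (by omega) hin
        simp only [pvCov, List.any_cons, Bool.or_eq_true, decide_eq_true_eq] at hcov
        simp only [pvCov]
        rcases hcov with h1 | h1
        · exact absurd h1.2 (by omega)
        · exact h1

-- ===== VERDICT (by name: the statement is the Claim_ definition above) =====
theorem is_comprised_other_words_spec : Claim_equal_is_comprised_other_words := by
  intro word words _hdom hpre
  unfold Spec_is_comprised_other_words
  unfold is_comprised_other_words is_comprised_other_words_alt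
  simp only []
  set cs := word.toList with hcs
  -- B's interval list as a flatMap
  have hflat : words.foldl
      (fun acc wstr => acc ++ pvOccList cs wstr.toList (cs.length + 1) (PySem.Chars.find cs wstr.toList)) [] =
      words.flatMap (fun wstr => pvOccList cs wstr.toList (cs.length + 1) (PySem.Chars.find cs wstr.toList)) := by
    rw [PySem.List.foldl_append_eq_flatMap]
    simp
  set F := words.flatMap (fun wstr => pvOccList cs wstr.toList (cs.length + 1) (PySem.Chars.find cs wstr.toList)) with hF
  set ivA := (pvGetRemovingIntervals cs words).items.flatMap (·.2) with hivA
  -- A's nested marks fold is the fold over the flattened interval list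
  have hAfold : (pvGetRemovingIntervals cs words).items.foldl
      (fun m kv => kv.2.foldl (fun m p => pvPaint m p.1 p.2) m) (List.replicate cs.length false) =
      ivA.foldl (fun m p => pvPaint m p.1 p.2) (List.replicate cs.length false) := by
    rw [hivA, List.foldl_flatMap]
  -- membership of A's intervals = membership of B's intervals
  have hmem : ∀ x, x ∈ ivA ↔ x ∈ F := by
    intro x
    rw [hivA, pvMem_dict_iff, pvEvents_map_snd]
  -- bounds
  have hbF : ∀ p ∈ F, 0 ≤ p.1 ∧ p.1 < p.2 ∧ p.2 ≤ (cs.length : Int) := by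
    intro p hp
    rw [hF, List.mem_flatMap] at hp
    obtain ⟨wstr, hw, hpo⟩ := hp
    have hne : wstr.toList ≠ [] := by
      intro hc
      have heq : wstr = "" := String.ext (by simpa using hc)
      exact hpre (heq ▸ hw)
    exact pvOccList_bounds0 cs wstr.toList hne (cs.length + 1) p hpo
  have hbA : ∀ p ∈ ivA, 0 ≤ p.1 ∧ p.1 < p.2 ∧ p.2 ≤ (cs.length : Int) := by
    intro p hp
    exact hbF p ((hmem p).mp hp)
  set S := PySem.List.sorted F (fun p => p.1) with hS
  have hmemS : ∀ x, x ∈ S ↔ x ∈ ivA := by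
    intro x
    rw [hS, PySem.List.mem_sorted]
    exact (hmem x).symm
  have hbS : ∀ p ∈ S, 0 ≤ p.1 ∧ p.1 < p.2 ∧ p.2 ≤ (cs.length : Int) := by
    intro p hp
    exact hbA p ((hmemS p).mp hp)
  have hpw : S.Pairwise (fun a b => a.1 ≤ b.1) := PySem.List.sorted_pairwise F (fun p => p.1)
  apply Bool.eq_iff_iff.mpr
  rw [hAfold, hflat]
  rw [pvA_iff cs ivA hbA]
  rw [pvSweep_spec (cs.length : Int) S 0 hpw hbS]
  constructor
  · intro h i h0 hn
    rw [pvCov_congr hmemS i]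
    exact h i h0 hn
  · intro h i h0 hn
    rw [← pvCov_congr hmemS i]
    exact h i h0 hn
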